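-- pv_equiv track=rewrite | github.com/pypi-data/pypi-mirror-313 | packages/mb-annotation/mb_annotation-1.0.63.tar.gz/mb_annotation-1.0.63/mb_annotation/segsam2.py | get_final_similar_box
-- ===== SOURCE A (Python) =====
-- def get_similarity_value(box1,box2):
--     val1 = abs(box1[0]-box2[0])
--     val2 = abs(box1[1]-box2[1])
--     val3 = abs(box1[2]-box2[2])
--     val4 = abs(box1[3]-box2[3])
--     total_val = val1+val2+val3+val4
--     return total_val
--
-- def get_final_similar_box(box1,box2: list):
--     best_box = None
--     best_val = None
--     index = None
--     for i in box2:
--         val = get_similarity_value(box1,i)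
--         if best_box is None or val < best_val:
--             best_box = i
--             best_val = val
--             index = box2.index(i)
--     return best_box,index
-- ===== SOURCE B (Python) =====
-- def get_similarity_value(box1, box2):
--     val1 = abs(box1[0] - box2[0])
--     val2 = abs(box1[1] - box2[1])
--     val3 = abs(box1[2] - box2[2])
--     val4 = abs(box1[3] - box2[3])
--     return val1 + val2 + val3 + val4
--
-- def get_final_similar_box(box1, box2: list):
--     # table of distances, then one min + first-index scan
--     if not box2:
--         return None, None
--     dists = [get_similarity_value(box1, b) for b in box2]
--     m = min(dists)
--     idx = dists.index(m)
--     return box2[idx], idx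
-- ===== Notes on version B (the rewrite author's own statement) =====
-- stated objective: alternative
-- what changed: Replaces A's running-minimum loop, which re-scans box2 with list.index at every improvement, by building the full distance table once and then returning min(dists) with its first index.
import Mathlib
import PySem

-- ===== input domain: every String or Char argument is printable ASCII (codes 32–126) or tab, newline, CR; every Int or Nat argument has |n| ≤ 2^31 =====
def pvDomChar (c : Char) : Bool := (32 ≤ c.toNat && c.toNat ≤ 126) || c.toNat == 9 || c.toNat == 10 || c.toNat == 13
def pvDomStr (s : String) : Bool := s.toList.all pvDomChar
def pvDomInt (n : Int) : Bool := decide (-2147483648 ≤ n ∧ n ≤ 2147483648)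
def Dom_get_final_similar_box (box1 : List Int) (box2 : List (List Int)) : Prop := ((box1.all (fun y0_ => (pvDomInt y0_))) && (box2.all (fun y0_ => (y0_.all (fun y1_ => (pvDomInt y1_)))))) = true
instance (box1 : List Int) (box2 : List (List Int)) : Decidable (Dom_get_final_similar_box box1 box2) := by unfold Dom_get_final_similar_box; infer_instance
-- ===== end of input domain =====

-- B replaces A's running-minimum loop (which calls box2.index inside the loop) by a distance
-- table followed by one min + first-index scan; objective: alternative decomposition.

-- ===== PORT A =====
-- shared module helper get_similarity_value (both Pythons use it verbatim)
def pvSim (box1 box2 : List Int) : Int :=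
  let val1 := |PySem.List.pyGetD box1 0 0 - PySem.List.pyGetD box2 0 0|
  let val2 := |PySem.List.pyGetD box1 1 0 - PySem.List.pyGetD box2 1 0|
  let val3 := |PySem.List.pyGetD box1 2 0 - PySem.List.pyGetD box2 2 0|
  let val4 := |PySem.List.pyGetD box1 3 0 - PySem.List.pyGetD box2 3 0|
  val1 + val2 + val3 + val4

def get_final_similar_box (box1 : List Int) (box2 : List (List Int)) : Option (List Int) × Option Int :=
  let st := box2.foldl
    (fun (s : Option (List Int) × Option Int × Option Int) i =>
      let val := pvSim box1 i
      if s.1 = none ∨ val < s.2.1.getD 0 then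
        (some i, some val, (PySem.List.index? box2 i).map (fun n => (n : Int)))
      else s)
    (none, none, none)
  (st.1, st.2.2)

-- ===== PORT B =====
def get_final_similar_box_alt (box1 : List Int) (box2 : List (List Int)) : Option (List Int) × Option Int :=
  match box2 with
  | [] => (none, none)
  | _ :: _ =>
    let dists := box2.map (fun b => pvSim box1 b)
    match PySem.List.min? dists (fun y => y) with
    | none => (none, none)  -- unreachable: dists is nonempty
    | some m =>
      match PySem.List.index? dists m with
      | none => (none, none)  -- unreachable: m ∈ dists
      | some idx => (some (PySem.List.pyGetD box2 (idx : Int) []), some (idx : Int))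

-- ===== PRECONDITION & SPEC =====
-- A raises IndexError (inside get_similarity_value) when box2 is nonempty and box1 or some
-- element of box2 has fewer than 4 entries; Pre_ excludes exactly those inputs.
def Pre_get_final_similar_box (box1 : List Int) (box2 : List (List Int)) : Prop :=
  box2 = [] ∨ (4 ≤ box1.length ∧ ∀ b ∈ box2, 4 ≤ b.length)
instance (box1 : List Int) (box2 : List (List Int)) : Decidable (Pre_get_final_similar_box box1 box2) := by unfold Pre_get_final_similar_box; infer_instance
def pvWitness_get_final_similar_box : List Int × List (List Int) := ([0, 0, 0, 0], [[1, 2, 3, 4]])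

def Spec_get_final_similar_box (box1 : List Int) (box2 : List (List Int)) (out : Option (List Int) × Option Int) : Prop := out = get_final_similar_box_alt box1 box2
instance (box1 : List Int) (box2 : List (List Int)) (out : Option (List Int) × Option Int) : Decidable (Spec_get_final_similar_box box1 box2 out) := by unfold Spec_get_final_similar_box; infer_instance

-- ===== CLAIM (what is proved, stated in full; the proofs are below) =====
def Claim_equal_get_final_similar_box : Prop := ∀ (box1 : List Int) (box2 : List (List Int)), Dom_get_final_similar_box box1 box2 → Pre_get_final_similar_box box1 box2 → Spec_get_final_similar_box box1 box2 (get_final_similar_box box1 box2)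

-- ===== LEMMAS AND PROOFS =====

-- the running minimum of a list is a member and a lower bound
theorem pv_minfold_mem (x : Int) (t : List Int) : List.foldl min x t ∈ x :: t := by
  have h : (x :: t).min? = some (List.foldl min x t) := List.min?_cons'
  exact (List.min?_eq_some_iff.mp h).1

theorem pv_minfold_le (x : Int) (t : List Int) : ∀ b ∈ x :: t, List.foldl min x t ≤ b := by
  have h : (x :: t).min? = some (List.foldl min x t) := List.min?_cons'
  exact (List.min?_eq_some_iff.mp h).2

theorem pv_idxOf?_of_mem (m : Int) (ds : List Int) (h : m ∈ ds) :
    List.idxOf? m ds = some (List.idxOf m ds) := by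
  induction ds with
  | nil => cases h
  | cons y t ih =>
    by_cases hy : y = m
    · subst hy; simp [List.idxOf?_cons]
    · have hm : m ∈ t := by
        rcases List.mem_cons.mp h with h' | h'
        · exact absurd h'.symm hy
        · exact h'
      have hb : (y == m) = false := beq_eq_false_iff_ne.mpr hy
      simp [List.idxOf?_cons, List.idxOf_cons, hb, ih hm]

-- the characterised state of A's loop after processing the prefix p of box2
def pvState (box1 : List Int) (p : List (List Int)) :
    Option (List Int) × Option Int × Option Int :=
  match p with
  | [] => (none, none, none)
  | x :: t =>
    (some ((x :: t).getD
        (List.idxOf (List.foldl min (pvSim box1 x) (t.map (pvSim box1)))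
          ((x :: t).map (pvSim box1))) []),
     some (List.foldl min (pvSim box1 x) (t.map (pvSim box1))),
     some ((List.idxOf (List.foldl min (pvSim box1 x) (t.map (pvSim box1)))
          ((x :: t).map (pvSim box1)) : Nat) : Int))

theorem pv_foldA (box1 : List Int) (L : List (List Int)) :
    ∀ (l p : List (List Int)), L = p ++ l →
      List.foldl
        (fun (s : Option (List Int) × Option Int × Option Int) i =>
          let val := pvSim box1 i
          if s.1 = none ∨ val < s.2.1.getD 0 then
            (some i, some val, (PySem.List.index? L i).map (fun n => (n : Int)))
          else s)
        (pvState box1 p) l = pvState box1 (p ++ l) := by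
  intro l
  induction l with
  | nil => intro p h; simp
  | cons x l ih =>
    intro p h
    have hL : L = (p ++ [x]) ++ l := by simpa using h
    have hstep :
        (let val := pvSim box1 x
         if (pvState box1 p).1 = none ∨ val < (pvState box1 p).2.1.getD 0 then
           (some x, some val, (PySem.List.index? L x).map (fun n => (n : Int)))
         else pvState box1 p) = pvState box1 (p ++ [x]) := by
      cases p with
      | nil =>
        have hL0 : L = x :: l := h
        subst hL0
        show (some x, some (pvSim box1 x),
            (PySem.List.index? (x :: l) x).map (fun n => (n : Int))) = pvState box1 [x]
        rw [PySem.List.index?_cons_self]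
        simp [pvState]
      | cons y t =>
        by_cases hlt :
            pvSim box1 x < List.foldl min (pvSim box1 y) (t.map (pvSim box1))
        · -- update: the new element is a strictly better minimum
          have hle := pv_minfold_le (pvSim box1 y) (t.map (pvSim box1))
          have hnotmem : pvSim box1 x ∉ (pvSim box1 y :: t.map (pvSim box1)) := by
            intro hmem
            have := hle (pvSim box1 x) hmem
            omega
          have hxnot : x ∉ (y :: t) := by
            intro hx
            exact hnotmem (by simpa using List.mem_map_of_mem (f := pvSim box1) hx)
          have hidxL : PySem.List.index? L x = some (t.length + 1) := by
            rw [hL]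
            have h1 : PySem.List.index? ((y :: t) ++ [x]) x = some (y :: t).length :=
              PySem.List.index?_append_singleton_self _ _ hxnot
            rw [PySem.List.index?_append_of_mem l (by simp)]
            simpa using h1
          have hM : List.foldl min (pvSim box1 y) ((t ++ [x]).map (pvSim box1)) =
              pvSim box1 x := by
            simp only [List.map_append, List.map_cons, List.map_nil]
            rw [List.foldl_concat]
            exact min_eq_right (le_of_lt hlt)
          have hJ : List.idxOf (pvSim box1 x) ((y :: (t ++ [x])).map (pvSim box1)) =
              t.length + 1 := by
            simp only [List.map_cons, List.map_append, List.map_nil]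
            rw [show (pvSim box1 y :: (t.map (pvSim box1) ++ [pvSim box1 x])) =
                (pvSim box1 y :: t.map (pvSim box1)) ++ [pvSim box1 x] from rfl]
            rw [List.idxOf_append, if_neg hnotmem]
            simp
          have hG : (y :: (t ++ [x])).getD (t.length + 1) [] = x := by
            rw [show (y :: (t ++ [x])) = (y :: t) ++ [x] from rfl]
            rw [List.getD_append_right _ _ _ _ (by simp)]
            simp
          show (if (pvState box1 (y :: t)).1 = none ∨
                pvSim box1 x < (pvState box1 (y :: t)).2.1.getD 0 then
              (some x, some (pvSim box1 x),
                (PySem.List.index? L x).map (fun n => (n : Int)))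
            else pvState box1 (y :: t)) = pvState box1 ((y :: t) ++ [x])
          rw [show ((y :: t) ++ [x]) = y :: (t ++ [x]) from rfl]
          simp only [pvState]
          rw [if_pos (Or.inr (by simpa using hlt))]
          rw [hM, hJ, hG, hidxL]
          simp
        · -- no update: the old minimum and its index survive
          have hge : List.foldl min (pvSim box1 y) (t.map (pvSim box1)) ≤ pvSim box1 x :=
            not_lt.mp hlt
          have hmem : List.foldl min (pvSim box1 y) (t.map (pvSim box1)) ∈
              (pvSim box1 y :: t.map (pvSim box1)) :=
            pv_minfold_mem (pvSim box1 y) (t.map (pvSim box1))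
          have hM : List.foldl min (pvSim box1 y) ((t ++ [x]).map (pvSim box1)) =
              List.foldl min (pvSim box1 y) (t.map (pvSim box1)) := by
            simp only [List.map_append, List.map_cons, List.map_nil]
            rw [List.foldl_concat]
            exact min_eq_left hge
          have hJ : List.idxOf (List.foldl min (pvSim box1 y) (t.map (pvSim box1)))
                ((y :: (t ++ [x])).map (pvSim box1)) =
              List.idxOf (List.foldl min (pvSim box1 y) (t.map (pvSim box1)))
                ((y :: t).map (pvSim box1)) := by
            simp only [List.map_cons, List.map_append, List.map_nil]
            rw [show (pvSim box1 y :: (t.map (pvSim box1) ++ [pvSim box1 x])) =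
                (pvSim box1 y :: t.map (pvSim box1)) ++ [pvSim box1 x] from rfl]
            rw [List.idxOf_append, if_pos hmem]
          have hjlt : List.idxOf (List.foldl min (pvSim box1 y) (t.map (pvSim box1)))
              ((y :: t).map (pvSim box1)) < (y :: t).length := by
            have h1 : List.idxOf (List.foldl min (pvSim box1 y) (t.map (pvSim box1)))
                ((y :: t).map (pvSim box1)) < ((y :: t).map (pvSim box1)).length :=
              List.idxOf_lt_length_iff.mpr (by simpa using hmem)
            simpa using h1
          have hG : (y :: (t ++ [x])).getD
                (List.idxOf (List.foldl min (pvSim box1 y) (t.map (pvSim box1)))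
                  ((y :: t).map (pvSim box1))) [] =
              (y :: t).getD
                (List.idxOf (List.foldl min (pvSim box1 y) (t.map (pvSim box1)))
                  ((y :: t).map (pvSim box1))) [] := by
            rw [show (y :: (t ++ [x])) = (y :: t) ++ [x] from rfl]
            rw [List.getD_append _ _ _ _ hjlt]
          show (if (pvState box1 (y :: t)).1 = none ∨
                pvSim box1 x < (pvState box1 (y :: t)).2.1.getD 0 then
              (some x, some (pvSim box1 x),
                (PySem.List.index? L x).map (fun n => (n : Int)))
            else pvState box1 (y :: t)) = pvState box1 ((y :: t) ++ [x])
          rw [show ((y :: t) ++ [x]) = y :: (t ++ [x]) from rfl]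
          simp only [pvState]
          rw [if_neg (by simpa using hlt)]
          rw [hM, hJ, hG]
    rw [List.foldl_cons, hstep, ih (p ++ [x]) hL]
    simp

-- ===== VERDICT (by name: the statement is the Claim_ definition above) =====
theorem get_final_similar_box_spec : Claim_equal_get_final_similar_box := by
  intro box1 box2 _ _
  unfold Spec_get_final_similar_box
  cases box2 with
  | nil => rfl
  | cons x t =>
    have hfold := pv_foldA box1 (x :: t) (x :: t) [] rfl
    have hmem : List.foldl min (pvSim box1 x) (t.map (pvSim box1)) ∈
        (x :: t).map (pvSim box1) := by
      simpa using pv_minfold_mem (pvSim box1 x) (t.map (pvSim box1))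
    have hmin? : PySem.List.min? ((x :: t).map (pvSim box1)) (fun y => y) =
        some (List.foldl min (pvSim box1 x) (t.map (pvSim box1))) := by
      rw [List.map_cons]
      exact PySem.List.min?_id_cons _ _
    simp only [get_final_similar_box, get_final_similar_box_alt]
    rw [show ((none, none, none) : Option (List Int) × Option Int × Option Int) =
        pvState box1 [] from rfl, hfold]
    simp only [List.nil_append]
    rw [show (fun b => pvSim box1 b) = pvSim box1 from rfl]
    rw [hmin?]
    simp [pvState, PySem.List.pyGetD_natCast]
    rw [pv_idxOf?_of_mem _ _ (by simpa using hmem)]
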